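-- pv_equiv track=rewrite | github.com/yifanzhou106/JavaCoding | PythonCoding/字符串/将字符串拆分出最多异或和为0的子字符串的数量.py | mostXorZeroSubarrayDivision
-- ===== SOURCE A (Python) =====
-- def mostXorZeroSubarrayDivision(nums):
--     dp = [0 for _ in range(len(nums))]
--     map = {}
--     map[0] = -1
--     xor = 0
--
--     for i in range(len(nums)):
--         xor = xor ^ nums[i]
--         if xor in map:
--             pre = map[xor]
--             dp[i] = 1 if pre == -1 else dp[pre] + 1
--         if i > 0:
--             dp[i] = max(dp[i], dp[i - 1])
--         map[xor] = i
--     return dp[-1]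
--
-- nums = [1, 2, 3, 0, 4, 3, 2, 1, 0, 2, 1, 3]
-- ===== SOURCE B (Python) =====
-- def mostXorZeroSubarrayDivision(nums):
--     xor = 0
--     seen = {0}
--     count = 0
--     for num in nums:
--         xor ^= num
--         if xor in seen:
--             count += 1
--             seen = {xor}
--         else:
--             seen.add(xor)
--     return count
-- ===== Notes on version B (the rewrite author's own statement) =====
-- stated objective: simpler
-- what changed: Replaced the dp-array + last-occurrence-index hashmap DP with a single greedy pass keeping a running xor, a seen-set that is reset to {xor} at every cut, and a counter.
import Mathlib
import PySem

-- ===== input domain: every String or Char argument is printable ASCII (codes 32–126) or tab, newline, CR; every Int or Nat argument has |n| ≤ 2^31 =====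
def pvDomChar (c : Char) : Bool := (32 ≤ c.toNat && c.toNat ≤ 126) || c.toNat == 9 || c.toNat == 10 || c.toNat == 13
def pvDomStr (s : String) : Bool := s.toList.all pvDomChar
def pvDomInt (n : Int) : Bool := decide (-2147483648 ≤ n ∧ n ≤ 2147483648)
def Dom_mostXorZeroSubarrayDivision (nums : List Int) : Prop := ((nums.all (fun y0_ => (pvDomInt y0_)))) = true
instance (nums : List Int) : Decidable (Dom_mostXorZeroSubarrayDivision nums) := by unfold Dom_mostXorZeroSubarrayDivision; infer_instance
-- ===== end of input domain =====

-- B replaces A's dp-array + last-occurrence hashmap DP by a greedy scan (running xor, seen-set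
-- reset at every cut, counter): simpler, same O(n) cost.

-- ===== PORT A =====
-- loop body of A: xor ^= nums[i]; if xor in map: dp[i] = 1 if map[xor] == -1 else dp[map[xor]]+1;
-- if i > 0: dp[i] = max(dp[i], dp[i-1]); map[xor] = i.  Indices i, i-1, map[xor] are always in
-- range (or the special -1 handled by the branch), so pyGetD/pySetD are exact here.
def aStep (nums : List Int) (st : List Int × PySem.Dict Int Int × Int) (i : Int) :
    List Int × PySem.Dict Int Int × Int :=
  let x2 := PySem.Int.bxor st.2.2 (PySem.List.pyGetD nums i 0)
  let dp1 := match (st.2.1).get? x2 with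
    | some pre => PySem.List.pySetD st.1 i (if pre = -1 then 1 else PySem.List.pyGetD st.1 pre 0 + 1)
    | none => st.1
  let dp2 := if i > 0 then
      PySem.List.pySetD dp1 i (max (PySem.List.pyGetD dp1 i 0) (PySem.List.pyGetD dp1 (i - 1) 0))
    else dp1
  (dp2, (st.2.1).insert x2 i, x2)

-- dp[-1] raises IndexError on an empty dp; that input is excluded by Pre_, getD 0 is never taken there.
def mostXorZeroSubarrayDivision (nums : List Int) : Int :=
  let dp : List Int := (PySem.List.pyRange 0 (PySem.List.len nums) 1).map (fun _ => 0)
  let m : PySem.Dict Int Int := PySem.Dict.empty.insert 0 (-1)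
  let st := (PySem.List.pyRange 0 (PySem.List.len nums) 1).foldl (aStep nums) (dp, m, 0)
  PySem.List.pyGetD st.1 (-1) 0

-- ===== PORT B =====
def bStep (st : Int × PySem.Set Int × Int) (num : Int) : Int × PySem.Set Int × Int :=
  let x2 := PySem.Int.bxor st.1 num
  if PySem.Set.contains st.2.1 x2 then (x2, PySem.Set.ofList [x2], st.2.2 + 1)
  else (x2, PySem.Set.add st.2.1 x2, st.2.2)

def mostXorZeroSubarrayDivision_alt (nums : List Int) : Int :=
  (nums.foldl bStep (0, PySem.Set.ofList [0], 0)).2.2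

-- ===== PRECONDITION & SPEC =====
-- Pre_ excludes exactly the empty list, on which A raises IndexError (dp[-1] of an empty dp).
def Pre_mostXorZeroSubarrayDivision (nums : List Int) : Prop := nums ≠ []
instance (nums : List Int) : Decidable (Pre_mostXorZeroSubarrayDivision nums) := by
  unfold Pre_mostXorZeroSubarrayDivision; infer_instance
def pvWitness_mostXorZeroSubarrayDivision : List Int := [1, 2, 3, 0, 3, 2, 1]

def Spec_mostXorZeroSubarrayDivision (nums : List Int) (out : Int) : Prop :=
  out = mostXorZeroSubarrayDivision_alt nums
instance (nums : List Int) (out : Int) : Decidable (Spec_mostXorZeroSubarrayDivision nums out) := by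
  unfold Spec_mostXorZeroSubarrayDivision; infer_instance

-- ===== CLAIM (what is proved, stated in full; the proofs are below) =====
def Claim_equal_mostXorZeroSubarrayDivision : Prop :=
  ∀ (nums : List Int), Dom_mostXorZeroSubarrayDivision nums →
    Pre_mostXorZeroSubarrayDivision nums →
    Spec_mostXorZeroSubarrayDivision nums (mostXorZeroSubarrayDivision nums)

-- ===== LEMMAS AND PROOFS =====

-- value A's dp array holds at a stored index p (p = -1 stands for "before the start", value 0)
def dAt (dp : List Int) (p : Int) : Int := if p = -1 then 0 else dp.getD p.toNat 0

theorem pyLast_eq (L : List Int) (n : Nat) (hn : 0 < n) (h : L.length = n) :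
    PySem.List.pyGetD L (-1) 0 = L.getD (n - 1) 0 := by
  have hne : L ≠ [] := by
    intro h'; subst h'; simp at h; omega
  rw [PySem.List.pyGetD_neg_one L 0 hne, List.getLast_eq_getElem,
    List.getD_eq_getElem?_getD, List.getElem?_eq_getElem (by omega), Option.getD_some]
  congr 1
  omega

theorem loopInv (nums : List Int) (fuel : Nat) :
    ∀ (k : Nat) (dp : List Int) (m : PySem.Dict Int Int) (x c : Int) (seen : PySem.Set Int),
    nums.length - k = fuel → k ≤ nums.length →
    dp.length = nums.length →
    (∀ j : Nat, k ≤ j → j < nums.length → dp.getD j 0 = 0) →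
    (k = 0 → c = 0) →
    (∀ j : Nat, k = j + 1 → dp.getD j 0 = c) →
    0 ≤ c →
    (∀ v p, m.get? v = some p →
      (p = -1 ∨ (0 ≤ p ∧ p < (k : Int))) ∧ dAt dp p ≤ c ∧ (dAt dp p = c ↔ v ∈ seen)) →
    (∀ v, v ∈ seen → (m.get? v).isSome = true) →
    ((((PySem.List.pyRange (k : Int) (nums.length : Int) 1).foldl (aStep nums) (dp, m, x)).1.length
        = nums.length) ∧
     ∀ j : Nat, nums.length = j + 1 →
      ((PySem.List.pyRange (k : Int) (nums.length : Int) 1).foldl (aStep nums) (dp, m, x)).1.getD j 0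
        = ((nums.drop k).foldl bStep (x, seen, c)).2.2) := by
  induction fuel with
  | zero =>
    intro k dp m x c seen hfuel hk hlen h2 h30 h3 hc h5 h6
    have hkn : k = nums.length := by omega
    subst hkn
    rw [PySem.List.pyRange_one_eq_nil (by omega), List.drop_length]
    exact ⟨hlen, fun j hj => h3 j hj⟩
  | succ f ih =>
    intro k dp m x c seen hfuel hk hlen h2 h30 h3 hc h5 h6
    have hkn : k < nums.length := by omega
    have hki : (k : Int) < (nums.length : Int) := by exact_mod_cast hkn
    rw [PySem.List.pyRange_one_cons hki, List.drop_eq_getElem_cons hkn]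
    simp only [List.foldl_cons]
    -- the common new xor
    have hget : PySem.List.pyGetD nums (k : Int) 0 = nums[k] := by
      simp [PySem.List.pyGetD_natCast, List.getD_eq_getElem, hkn]
    set x2 := PySem.Int.bxor x nums[k] with hx2
    -- compute one step of A and one step of B, establishing the three dp facts
    by_cases hx : x2 ∈ seen
    · -- cut case
      have hsome := h6 x2 hx
      obtain ⟨pre, hpre⟩ := Option.isSome_iff_exists.mp hsome
      obtain ⟨hprerange, hpred, hpreiff⟩ := h5 x2 pre hpre
      have hdc : dAt dp pre = c := hpreiff.mpr hx
      -- A's written value is c + 1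
      have hv : (if pre = -1 then (1 : Int) else PySem.List.pyGetD dp pre 0 + 1) = c + 1 := by
        rcases hprerange with h | ⟨h0, h1⟩
        · simp [h, dAt] at hdc ⊢; omega
        · have hne : pre ≠ -1 := by omega
          have : PySem.List.pyGetD dp pre 0 = dAt dp pre := by
            rw [PySem.List.pyGetD_of_nonneg dp 0 h0]; simp [dAt, hne]
          rw [this, hdc]; simp [hne]
      have hstepA : aStep nums (dp, m, x) (k : Int) = (dp.set k (c + 1), m.insert x2 (k : Int), x2) := by
        simp only [aStep, hget, ← hx2, hpre]
        rw [hv]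
        simp only [PySem.List.pySetD_natCast, Int.toNat_natCast]
        by_cases hk0 : 0 < k
        · have hcast : ((k : Int)) - 1 = ((k - 1 : Nat) : Int) := by push_cast [hk0]; omega
          have hgk : PySem.List.pyGetD (dp.set k (c + 1)) (k : Int) 0 = c + 1 := by
            simp [PySem.List.pyGetD_natCast, List.getD_eq_getElem?_getD, List.getElem?_set_self,
              hlen, hkn]
          have hgk1 : PySem.List.pyGetD (dp.set k (c + 1)) ((k : Int) - 1) 0 = c := by
            rw [hcast]
            simp only [PySem.List.pyGetD_natCast, List.getD_eq_getElem?_getD]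
            rw [List.getElem?_set_ne (by omega)]
            have := h3 (k - 1) (by omega)
            simpa [List.getD_eq_getElem?_getD] using this
          have hpos : (0 : Int) < (k : Int) := by exact_mod_cast hk0
          simp [hpos, hgk, hgk1, List.set_set, max_eq_left (by omega : c ≤ c + 1)]
        · have hk0' : k = 0 := by omega
          simp [hk0']
      have hstepB : bStep (x, seen, c) nums[k] = (x2, PySem.Set.ofList [x2], c + 1) := by
        simp only [bStep, ← hx2]
        rw [if_pos ((PySem.Set.contains_iff _ _).mpr hx)]
      rw [hstepA, hstepB]
      have hofl : PySem.Set.ofList [x2] = [x2] := by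
        simp [PySem.Set.ofList_cons, PySem.Set.ofList_nil, PySem.Set.discard]
      rw [hofl]
      have hcast1 : (k : Int) + 1 = ((k + 1 : Nat) : Int) := by push_cast; ring
      rw [hcast1]
      apply ih (k + 1) (dp.set k (c + 1)) (m.insert x2 (k : Int)) x2 (c + 1) [x2]
        (by omega) (by omega) (by simpa using hlen)
      · intro j hj hjn
        rw [List.getD_eq_getElem?_getD, List.getElem?_set_ne (by omega),
          ← List.getD_eq_getElem?_getD]
        exact h2 j (by omega) hjn
      · omega
      · intro j hj
        have : j = k := by omega
        subst this
        simp [List.getD_eq_getElem?_getD, List.getElem?_set_self, hlen, hkn]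
      · omega
      · intro v p hvp
        rw [PySem.Dict.get?_insert] at hvp
        by_cases hvx : v = x2
        · simp only [if_pos hvx] at hvp
          obtain rfl : p = (k : Int) := by injection hvp; omega
          refine ⟨Or.inr ⟨by omega, by exact_mod_cast Nat.lt_succ_self k⟩, ?_, ?_⟩
          · have : dAt (dp.set k (c + 1)) (k : Int) = c + 1 := by
              simp [dAt, (by omega : (k : Int) ≠ -1), Int.toNat_natCast,
                List.getD_eq_getElem?_getD, List.getElem?_set_self, hlen, hkn]
            omega
          · constructor
            · intro _; simp [hvx]
            · intro _
              simp [dAt, (by omega : (k : Int) ≠ -1), Int.toNat_natCast,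
                List.getD_eq_getElem?_getD, List.getElem?_set_self, hlen, hkn]
        · simp only [if_neg hvx] at hvp
          obtain ⟨hr, hd, hiff⟩ := h5 v p hvp
          have hdeq : dAt (dp.set k (c + 1)) p = dAt dp p := by
            rcases hr with h | ⟨h0, h1⟩
            · simp [dAt, h]
            · have hne : p ≠ -1 := by omega
              have hlt : p.toNat ≠ k := by omega
              simp [dAt, hne, List.getD_eq_getElem?_getD, List.getElem?_set_ne (by omega : k ≠ p.toNat)]
          refine ⟨by rcases hr with h | ⟨h0, h1⟩; exact Or.inl h; exact Or.inr ⟨h0, by omega⟩,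
            by omega, ?_⟩
          rw [hdeq]
          constructor
          · intro he; exfalso; omega
          · intro hm; exact absurd (List.mem_singleton.mp hm) hvx
      · intro v hv
        have : v = x2 := List.mem_singleton.mp hv
        subst this
        simp [PySem.Dict.get?_insert_self]
    · -- no cut: seen' = seen.add x2, c' = c; dp2.getD k = c, others unchanged
      have key : ∃ dp2 : List Int,
          aStep nums (dp, m, x) (k : Int) = (dp2, m.insert x2 (k : Int), x2) ∧
          dp2.length = nums.length ∧ dp2.getD k 0 = c ∧
          (∀ j : Nat, j ≠ k → dp2.getD j 0 = dp.getD j 0) := by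
        cases hpre : m.get? x2 with
        | some pre =>
          obtain ⟨hprerange, hpred, hpreiff⟩ := h5 x2 pre hpre
          have hdc : dAt dp pre ≠ c := fun h => hx (hpreiff.mp h)
          -- k = 0 is impossible here
          have hk0 : 0 < k := by
            by_contra h
            have hk0' : k = 0 := by omega
            subst hk0'
            rcases hprerange with h | ⟨h0, h1⟩
            · exact hdc (by simp [dAt, h, h30 rfl])
            · omega
          have hv : (if pre = -1 then (1 : Int) else PySem.List.pyGetD dp pre 0 + 1) = dAt dp pre + 1 := by
            rcases hprerange with h | ⟨h0, h1⟩
            · simp [h, dAt]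
            · have hne : pre ≠ -1 := by omega
              rw [PySem.List.pyGetD_of_nonneg dp 0 h0]; simp [dAt, hne]
          refine ⟨dp.set k c, ?_, by simpa using hlen, ?_, ?_⟩
          · simp only [aStep, hget, ← hx2, hpre]
            rw [hv]
            simp only [PySem.List.pySetD_natCast, Int.toNat_natCast]
            have hcast : ((k : Int)) - 1 = ((k - 1 : Nat) : Int) := by push_cast [hk0]; omega
            have hgk : PySem.List.pyGetD (dp.set k (dAt dp pre + 1)) (k : Int) 0 = dAt dp pre + 1 := by
              simp [PySem.List.pyGetD_natCast, List.getD_eq_getElem?_getD, List.getElem?_set_self,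
                hlen, hkn]
            have hgk1 : PySem.List.pyGetD (dp.set k (dAt dp pre + 1)) ((k : Int) - 1) 0 = c := by
              rw [hcast]
              simp only [PySem.List.pyGetD_natCast, List.getD_eq_getElem?_getD]
              rw [List.getElem?_set_ne (by omega)]
              have := h3 (k - 1) (by omega)
              simpa [List.getD_eq_getElem?_getD] using this
            have hpos : (0 : Int) < (k : Int) := by exact_mod_cast hk0
            simp only [hpos, if_pos (by exact_mod_cast hk0 : (0:Int) < (k:Int)), hgk, hgk1]
            rw [List.set_set, max_eq_right (by omega : dAt dp pre + 1 ≤ c)]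
            simp
          · simp [List.getD_eq_getElem?_getD, List.getElem?_set_self, hlen, hkn]
          · intro j hj
            rw [List.getD_eq_getElem?_getD, List.getElem?_set_ne (by omega),
              ← List.getD_eq_getElem?_getD]
        | none =>
          by_cases hk0 : 0 < k
          · refine ⟨dp.set k c, ?_, by simpa using hlen, ?_, ?_⟩
            · simp only [aStep, hget, ← hx2, hpre]
              have hcast : ((k : Int)) - 1 = ((k - 1 : Nat) : Int) := by push_cast [hk0]; omega
              have hgk : PySem.List.pyGetD dp (k : Int) 0 = 0 := by
                simp only [PySem.List.pyGetD_natCast]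
                exact h2 k (le_refl k) hkn
              have hgk1 : PySem.List.pyGetD dp ((k : Int) - 1) 0 = c := by
                rw [hcast]
                simp only [PySem.List.pyGetD_natCast]
                exact h3 (k - 1) (by omega)
              have hpos : (0 : Int) < (k : Int) := by exact_mod_cast hk0
              simp only [hpos, if_pos hpos, hgk, hgk1, PySem.List.pySetD_natCast, Int.toNat_natCast]
              rw [max_eq_right hc]
              simp
            · simp [List.getD_eq_getElem?_getD, List.getElem?_set_self, hlen, hkn]
            · intro j hj
              rw [List.getD_eq_getElem?_getD, List.getElem?_set_ne (by omega),
                ← List.getD_eq_getElem?_getD]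
          · have hk0' : k = 0 := by omega
            subst hk0'
            have hc0 : c = 0 := h30 rfl
            refine ⟨dp, ?_, hlen, ?_, fun j _ => rfl⟩
            · have hget' : PySem.List.pyGetD nums 0 0 = nums[0] := by simpa using hget
              simp [aStep, hget', ← hx2, hpre]
            · rw [hc0]; exact h2 0 (le_refl 0) hkn
      obtain ⟨dp2, hstepA, hlen2, hgk2, hne2⟩ := key
      have hstepB : bStep (x, seen, c) nums[k] = (x2, PySem.Set.add seen x2, c) := by
        simp only [bStep, ← hx2]
        rw [if_neg (by simp [PySem.Set.contains_iff, hx])]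
      rw [hstepA, hstepB]
      have hcast1 : (k : Int) + 1 = ((k + 1 : Nat) : Int) := by push_cast; ring
      rw [hcast1]
      apply ih (k + 1) dp2 (m.insert x2 (k : Int)) x2 c (PySem.Set.add seen x2)
        (by omega) (by omega) hlen2
      · intro j hj hjn
        rw [hne2 j (by omega)]
        exact h2 j (by omega) hjn
      · omega
      · intro j hj
        have : j = k := by omega
        subst this
        exact hgk2
      · exact hc
      · intro v p hvp
        rw [PySem.Dict.get?_insert] at hvp
        by_cases hvx : v = x2
        · simp only [if_pos hvx] at hvp
          obtain rfl : p = (k : Int) := by injection hvp; omega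
          have hda : dAt dp2 (k : Int) = c := by
            unfold dAt
            rw [if_neg (by omega : ¬((k : Int) = -1)), Int.toNat_natCast]
            exact hgk2
          exact ⟨Or.inr ⟨by omega, by exact_mod_cast Nat.lt_succ_self k⟩, le_of_eq hda,
            by rw [hda]; simp [PySem.Set.mem_add, hvx]⟩
        · simp only [if_neg hvx] at hvp
          obtain ⟨hr, hd, hiff⟩ := h5 v p hvp
          have hdeq : dAt dp2 p = dAt dp p := by
            rcases hr with h | ⟨h0, h1⟩
            · simp [dAt, h]
            · have hne : p ≠ -1 := by omega
              unfold dAt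
              rw [if_neg hne, if_neg hne]
              exact hne2 p.toNat (by omega)
          refine ⟨by rcases hr with h | ⟨h0, h1⟩; exact Or.inl h; exact Or.inr ⟨h0, by omega⟩,
            by omega, ?_⟩
          rw [hdeq, hiff, PySem.Set.mem_add]
          constructor
          · exact Or.inl
          · intro h; rcases h with h | h; exact h; exact absurd h hvx
      · intro v hv
        rw [PySem.Set.mem_add] at hv
        by_cases hvx : v = x2
        · simp [hvx, PySem.Dict.get?_insert_self]
        · rcases hv with hv | hv
          · rw [PySem.Dict.get?_insert_of_ne m _ hvx]
            exact h6 v hv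
          · exact absurd hv hvx

-- ===== VERDICT (by name: the statement is the Claim_ definition above) =====
theorem mostXorZeroSubarrayDivision_spec : Claim_equal_mostXorZeroSubarrayDivision := by
  unfold Claim_equal_mostXorZeroSubarrayDivision
  intro nums _ hpre
  unfold Spec_mostXorZeroSubarrayDivision mostXorZeroSubarrayDivision mostXorZeroSubarrayDivision_alt
  have hn : 0 < nums.length := List.length_pos_iff.mpr hpre
  have hdp0 : ∀ j : Nat,
      ((PySem.List.pyRange 0 (PySem.List.len nums) 1).map (fun _ => (0 : Int))).getD j 0 = 0 := by
    intro j
    rw [List.getD_eq_getElem?_getD, List.getElem?_map]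
    cases (PySem.List.pyRange 0 (PySem.List.len nums) 1)[j]? <;> simp
  have hlen0 : ((PySem.List.pyRange 0 (PySem.List.len nums) 1).map (fun _ => (0 : Int))).length
      = nums.length := by
    simp [PySem.List.len_eq, PySem.List.length_pyRange_one]
  have hmain := loopInv nums nums.length 0
    ((PySem.List.pyRange 0 (PySem.List.len nums) 1).map (fun _ => (0 : Int)))
    (PySem.Dict.empty.insert 0 (-1)) 0 0 (PySem.Set.ofList [0])
    (by omega) (by omega) hlen0 (fun j _ hj => hdp0 j) (fun _ => rfl)
    (fun j hj => by omega) (le_refl 0)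
    (by
      intro v p hvp
      rw [PySem.Dict.get?_insert] at hvp
      by_cases hv0 : v = 0
      · simp only [if_pos hv0] at hvp
        obtain rfl : p = (-1 : Int) := by injection hvp; omega
        refine ⟨Or.inl rfl, by simp [dAt], by simp [dAt, hv0, PySem.Set.mem_ofList]⟩
      · simp [if_neg hv0, PySem.Dict.get?_empty] at hvp)
    (by
      intro v hv
      rw [PySem.Set.mem_ofList] at hv
      have : v = 0 := List.mem_singleton.mp hv
      simp [this, PySem.Dict.get?_insert_self])
  obtain ⟨hlenF, hvalF⟩ := hmain
  exact (pyLast_eq _ nums.length hn hlenF).trans (hvalF (nums.length - 1) (by omega))
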